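-- pv_equiv track=rewrite | github.com/SBrophy-dev/ArtScii | download_model.py | _pick_gguf
-- ===== SOURCE A (Python) =====
-- _PREF_KEYWORDS = ['Q4_K_M', 'Q4_K', 'q4_k_m', 'q4_k', 'Q4', 'q4']
--
-- def _pick_gguf(repo_files: list[str]) -> str | None:
--     """Return the best GGUF filename from the repo listing."""
--     ggufs = [f for f in repo_files if f.endswith('.gguf')]
--     if not ggufs:
--         return None
--     # Prefer Q4_K_M (best quality/size balance), fall through to any GGUF
--     for kw in _PREF_KEYWORDS:
--         for name in ggufs:
--             if kw in name:
--                 return name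
--     return ggufs[0]
-- ===== SOURCE B (Python) =====
-- _PREF_KEYWORDS = ['Q4_K_M', 'Q4_K', 'q4_k_m', 'q4_k', 'Q4', 'q4']
--
-- def _pick_gguf(repo_files):
--     """Return the best GGUF filename from the repo listing."""
--     ggufs = [f for f in repo_files if f.endswith('.gguf')]
--     if not ggufs:
--         return None
--     def rank(name):
--         return next((i for i, kw in enumerate(_PREF_KEYWORDS) if kw in name),
--                     len(_PREF_KEYWORDS))
--     return min(ggufs, key=rank)
-- ===== Notes on version B (the rewrite author's own statement) =====
-- stated objective: alternative
-- what changed: Replaces A's nested keyword-priority scan (outer loop over keywords, inner loop over files, early return) with a single keyed minimum: each gguf gets a rank (index of the first matching keyword, or len(keywords)), and the stable min by rank is returned.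
import Mathlib
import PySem

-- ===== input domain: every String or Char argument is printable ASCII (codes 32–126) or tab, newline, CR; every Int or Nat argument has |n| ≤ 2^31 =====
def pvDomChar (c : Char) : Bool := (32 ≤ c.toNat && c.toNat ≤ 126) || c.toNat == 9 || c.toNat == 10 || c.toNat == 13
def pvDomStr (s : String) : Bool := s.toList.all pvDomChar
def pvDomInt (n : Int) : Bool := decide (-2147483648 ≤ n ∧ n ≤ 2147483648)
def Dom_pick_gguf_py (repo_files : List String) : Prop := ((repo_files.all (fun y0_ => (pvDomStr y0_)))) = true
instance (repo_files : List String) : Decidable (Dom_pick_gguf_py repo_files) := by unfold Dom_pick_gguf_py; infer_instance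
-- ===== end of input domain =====

-- B replaces A's nested keyword-priority scan with a rank function per filename plus a stable keyed minimum (alternative decomposition, same cost).


def prefKeywords : List String := ["Q4_K_M", "Q4_K", "q4_k_m", "q4_k", "Q4", "q4"]

-- ===== PORT A =====
-- inner loop: 'for name in ggufs: if kw in name: return name'
def innerA (kw : String) (names : List String) : Option String :=
  match names with
  | [] => none
  | n :: t => if PySem.Str.isIn kw n then some n else innerA kw t

-- outer loop: 'for kw in _PREF_KEYWORDS: …'
def outerA (kws ggufs : List String) : Option String :=
  match kws with
  | [] => none
  | kw :: rest =>
    match innerA kw ggufs with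
    | some n => some n
    | none => outerA rest ggufs

def pick_gguf_py (repo_files : List String) : Option String :=
  let ggufs := repo_files.filter (fun f => PySem.Str.endswith f ".gguf")
  if ggufs.isEmpty then none
  else
    match outerA prefKeywords ggufs with
    | some n => some n
    | none => PySem.List.pyGet? ggufs 0

-- ===== PORT B =====
-- rank(name) = index of first keyword contained in name, else len(keywords)
def rankB (kws : List String) (name : String) : Nat :=
  match kws with
  | [] => 0
  | kw :: rest => if PySem.Str.isIn kw name then 0 else rankB rest name + 1

def pick_gguf_py_alt (repo_files : List String) : Option String :=
  let ggufs := repo_files.filter (fun f => PySem.Str.endswith f ".gguf")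
  if ggufs.isEmpty then none
  else PySem.List.min? ggufs (fun n => rankB prefKeywords n)

-- ===== PRECONDITION & SPEC =====
def Spec_pick_gguf_py (repo_files : List String) (out : Option String) : Prop := out = pick_gguf_py_alt repo_files
instance (repo_files : List String) (out : Option String) : Decidable (Spec_pick_gguf_py repo_files out) := by unfold Spec_pick_gguf_py; infer_instance

-- ===== CLAIM (what is proved, stated in full; the proofs are below) =====
def Claim_equal_pick_gguf_py : Prop := ∀ (repo_files : List String), Dom_pick_gguf_py repo_files → Spec_pick_gguf_py repo_files (pick_gguf_py repo_files)

-- ===== LEMMAS AND PROOFS =====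

-- the foldl step inside PySem.List.min?
def minStep (key : String → Nat) (acc : Option String) (x : String) : Option String :=
  match acc with
  | none => some x
  | some m => if key x < key m then some x else some m

lemma min?_eq_foldl (l : List String) (key : String → Nat) :
    PySem.List.min? l key = l.foldl (minStep key) none := by
  unfold PySem.List.min?
  congr 1
  funext acc x
  cases acc with
  | none => rfl
  | some m => simp [minStep]

-- a current minimum with key 0 is never displaced
lemma foldl_keep_zero (key : String → Nat) (l : List String) (m : String)
    (hm : key m = 0) : l.foldl (minStep key) (some m) = some m := by
  induction l with
  | nil => rfl
  | cons y t ih => simp [minStep, hm, ih]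

-- constant key: the head wins
lemma min?_const_zero (l : List String) :
    PySem.List.min? l (fun _ => (0 : Nat)) = l.head? := by
  rw [min?_eq_foldl]
  cases l with
  | nil => rfl
  | cons x t => simp [List.foldl_cons, minStep, foldl_keep_zero (fun _ => 0) t x rfl]

-- if the first key-0 element is n, the fold from any nonzero-key accumulator lands on n
lemma foldl_find_zero (key : String → Nat) (l : List String) (m n : String)
    (hm : key m ≠ 0) (hf : l.find? (fun x => key x == 0) = some n) :
    l.foldl (minStep key) (some m) = some n := by
  induction l generalizing m with
  | nil => simp at hf
  | cons y t ih =>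
    by_cases hy : key y = 0
    · rw [List.find?_cons_of_pos (by simp [hy])] at hf
      have hn : y = n := Option.some_inj.mp hf
      subst hn
      simp [List.foldl_cons, minStep, hy, Nat.pos_of_ne_zero hm, foldl_keep_zero key t y hy]
    · rw [List.find?_cons_of_neg (by simp [hy])] at hf
      simp only [List.foldl_cons, minStep]
      by_cases hlt : key y < key m
      · simp only [hlt, if_true]; exact ih y hy hf
      · simp only [hlt, if_false]; exact ih m hm hf

lemma min?_find_zero (key : String → Nat) (l : List String) (n : String)
    (hf : l.find? (fun x => key x == 0) = some n) :
    PySem.List.min? l key = some n := by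
  rw [min?_eq_foldl]
  cases l with
  | nil => simp at hf
  | cons x t =>
    by_cases hx : key x = 0
    · rw [List.find?_cons_of_pos (by simp [hx])] at hf
      have hn : x = n := Option.some_inj.mp hf
      subst hn
      simp [List.foldl_cons, minStep, foldl_keep_zero key t x hx]
    · rw [List.find?_cons_of_neg (by simp [hx])] at hf
      simp only [List.foldl_cons, minStep]
      exact foldl_find_zero key t x n hx hf

-- shifting every key on the list (and the accumulator) by +1 does not change the fold's choice
lemma foldl_shift (key1 key2 : String → Nat) (l : List String)
    (hl : ∀ x ∈ l, key1 x = key2 x + 1) :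
    ∀ acc : Option String, (∀ m ∈ acc, key1 m = key2 m + 1) →
      l.foldl (minStep key1) acc = l.foldl (minStep key2) acc := by
  induction l with
  | nil => intro acc _; rfl
  | cons y t ih =>
    intro acc hacc
    have hy : key1 y = key2 y + 1 := hl y (by simp)
    have ht : ∀ x ∈ t, key1 x = key2 x + 1 := fun x hx => hl x (by simp [hx])
    cases acc with
    | none => exact ih ht (some y) (by simpa using hy)
    | some m =>
      have hm : key1 m = key2 m + 1 := hacc m (by simp)
      have hcond : (key1 y < key1 m) = (key2 y < key2 m) := by
        rw [hy, hm]; simp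
      simp only [List.foldl_cons, minStep, hcond]
      by_cases h : key2 y < key2 m
      · simp only [h, if_true]; exact ih ht (some y) (by simpa using hy)
      · simp only [h, if_false]; exact ih ht (some m) (by simpa using hm)

lemma min?_shift (key1 key2 : String → Nat) (l : List String)
    (hl : ∀ x ∈ l, key1 x = key2 x + 1) :
    PySem.List.min? l key1 = PySem.List.min? l key2 := by
  rw [min?_eq_foldl, min?_eq_foldl]
  exact foldl_shift key1 key2 l hl none (by simp)

lemma find?_congr_pred (p q : String → Bool) (l : List String)
    (h : ∀ x ∈ l, p x = q x) : l.find? p = l.find? q := by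
  induction l with
  | nil => rfl
  | cons x t ih =>
    have hx := h x (by simp)
    have ht : ∀ y ∈ t, p y = q y := fun y hy => h y (by simp [hy])
    by_cases hp : q x = true
    · rw [List.find?_cons_of_pos (hx ▸ hp), List.find?_cons_of_pos hp]
    · rw [List.find?_cons_of_neg (by simp [hx, hp]), List.find?_cons_of_neg (by simp [hp])]
      exact ih ht

lemma innerA_eq_find? (kw : String) (l : List String) :
    innerA kw l = l.find? (fun n => PySem.Str.isIn kw n) := by
  induction l with
  | nil => rfl
  | cons x t ih =>
    by_cases h : PySem.Str.isIn kw x = true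
    · rw [List.find?_cons_of_pos h]; simp only [innerA, if_pos h]
    · rw [List.find?_cons_of_neg (by simpa using h)]
      simp only [innerA, if_neg h]; exact ih

lemma rankB_cons_eq_zero_iff (kw : String) (rest : List String) (x : String) :
    (rankB (kw :: rest) x == 0) = PySem.Str.isIn kw x := by
  by_cases h : PySem.Str.isIn kw x = true
  · simp only [rankB, if_pos h]
    rw [h]; rfl
  · simp only [rankB, if_neg h]
    rw [show PySem.Str.isIn kw x = false from Bool.eq_false_iff.mpr h]
    simp

-- main bridge: on a nonempty list, A's nested scan with its gguf[0] fallback equals the stable min by rank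
lemma outerA_eq_min? (kws l : List String) :
    (match outerA kws l with
     | some n => some n
     | none => l.head?) = PySem.List.min? l (fun n => rankB kws n) := by
  induction kws with
  | nil =>
    have hkey : (fun n => rankB [] n) = (fun _ => (0 : Nat)) := by funext n; rfl
    rw [hkey, min?_const_zero]
    rfl
  | cons kw rest ih =>
    cases hfi : innerA kw l with
    | some n =>
      have houter : outerA (kw :: rest) l = some n := by
        simp only [outerA, hfi]
      have hfind : l.find? (fun x => rankB (kw :: rest) x == 0) = some n := by
        rw [find?_congr_pred _ _ l (fun x _ => rankB_cons_eq_zero_iff kw rest x),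
          ← innerA_eq_find?]
        exact hfi
      rw [houter, min?_find_zero _ l n hfind]
    | none =>
      have houter : outerA (kw :: rest) l = outerA rest l := by
        simp only [outerA, hfi]
      have hno : ∀ x ∈ l, ¬ PySem.Str.isIn kw x = true := by
        rw [innerA_eq_find?] at hfi
        intro x hx
        simpa using List.find?_eq_none.mp hfi x hx
      rw [houter, ih]
      refine (min?_shift _ _ l ?_).symm
      intro x hx
      simp only [rankB, if_neg (hno x hx)]

lemma head?_eq_pyGet? (l : List String) :
    PySem.List.pyGet? l 0 = l.head? := by
  cases l <;> simp [PySem.List.pyGet?, PySem.List.pyIdx?]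

-- ===== VERDICT (by name: the statement is the Claim_ definition above) =====
theorem pick_gguf_py_spec : Claim_equal_pick_gguf_py := by
  intro repo_files _
  unfold Spec_pick_gguf_py pick_gguf_py pick_gguf_py_alt
  set ggufs := repo_files.filter (fun f => PySem.Str.endswith f ".gguf") with hg
  by_cases he : ggufs.isEmpty
  · simp [he]
  · simp only [he, Bool.false_eq_true, if_false]
    rw [← outerA_eq_min? prefKeywords ggufs]
    cases outerA prefKeywords ggufs <;> simp [head?_eq_pyGet?]
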